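-- pv_equiv track=rewrite | github.com/m0nk111/agent-forge | engine/operations/creative_status.py | _select_theme
-- ===== SOURCE A (Python) =====
-- from typing import Iterable, List
--
-- def _select_theme(labels: Iterable[str]) -> str:
--     """Select a theme based on labels, falling back to default."""
--     normalized = {label.lower() for label in labels}
--     if normalized.intersection({"bug", "fix", "regression"}):
--         return "bug"
--     if normalized.intersection({"docs", "documentation", "doc"}):
--         return "docs"
--     if normalized.intersection({"ops", "infrastructure", "devops", "monitoring"}):
--         return "ops"
--     return "default"
-- ===== SOURCE B (Python) =====
-- # B: no sets, no intersections: reduce the labels to the MINIMUM priority rank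
-- # (bug=0, docs=1, ops=2, unknown=3) in a single loop with early exit at 0,
-- # then index a fixed theme table with the best rank.
-- _RANK = {
--     "bug": 0, "fix": 0, "regression": 0,
--     "docs": 1, "documentation": 1, "doc": 1,
--     "ops": 2, "infrastructure": 2, "devops": 2, "monitoring": 2,
-- }
-- _THEMES = ("bug", "docs", "ops", "default")
--
-- def _select_theme(labels):
--     best = 3
--     for label in labels:
--         r = _RANK.get(label.lower(), 3)
--         if r < best:
--             best = r
--             if best == 0:
--                 break
--     return _THEMES[best]
-- ===== Notes on version B (the rewrite author's own statement) =====
-- stated objective: alternative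
-- what changed: Replaced A's set-building plus three set-intersection branches by a numeric min-reduction: each label is mapped to a priority rank (bug=0, docs=1, ops=2, unknown=3), one loop keeps the running minimum with early exit at rank 0, and the answer is a fixed theme table indexed by the best rank.
import Mathlib
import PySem

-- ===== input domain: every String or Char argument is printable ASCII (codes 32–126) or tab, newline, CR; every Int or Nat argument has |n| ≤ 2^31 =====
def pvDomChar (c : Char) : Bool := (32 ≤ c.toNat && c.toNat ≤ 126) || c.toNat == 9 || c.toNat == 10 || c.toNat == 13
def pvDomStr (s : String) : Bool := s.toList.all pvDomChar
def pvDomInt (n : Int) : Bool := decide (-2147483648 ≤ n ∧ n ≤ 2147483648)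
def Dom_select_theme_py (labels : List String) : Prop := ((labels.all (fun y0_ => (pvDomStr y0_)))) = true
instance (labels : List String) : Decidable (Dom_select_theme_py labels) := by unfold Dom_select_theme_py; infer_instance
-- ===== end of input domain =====

-- B replaces A's set-building and three set-intersection branches by a numeric
-- min-reduction over per-label priority ranks, then a table lookup (objective: alternative).


-- ===== PORT A =====
def select_theme_py (labels : List String) : String :=
  let normalized : PySem.Set String := PySem.Set.ofList (labels.map PySem.Str.lower)
  if PySem.Set.inter normalized (PySem.Set.ofList ["bug", "fix", "regression"]) ≠ [] then "bug"
  else if PySem.Set.inter normalized (PySem.Set.ofList ["docs", "documentation", "doc"]) ≠ [] then "docs"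
  else if PySem.Set.inter normalized (PySem.Set.ofList ["ops", "infrastructure", "devops", "monitoring"]) ≠ [] then "ops"
  else "default"

-- ===== PORT B =====
def keywordRank : PySem.Dict String Nat := PySem.Dict.ofList
  [("bug", 0), ("fix", 0), ("regression", 0),
   ("docs", 1), ("documentation", 1), ("doc", 1),
   ("ops", 2), ("infrastructure", 2), ("devops", 2), ("monitoring", 2)]

def themeTable : List String := ["bug", "docs", "ops", "default"]

-- the loop of Source B: running minimum rank, early break once the best rank 0 is reached
def bestRankLoop : List String → Nat → Nat
  | [], best => best
  | label :: rest, best =>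
      let r := keywordRank.getD (PySem.Str.lower label) 3
      if r < best then
        if r = 0 then 0 else bestRankLoop rest r
      else bestRankLoop rest best

def select_theme_py_alt (labels : List String) : String :=
  themeTable.getD (bestRankLoop labels 3) "default"

-- ===== PRECONDITION & SPEC =====
def Spec_select_theme_py (labels : List String) (out : String) : Prop := out = select_theme_py_alt labels
instance (labels : List String) (out : String) : Decidable (Spec_select_theme_py labels out) := by unfold Spec_select_theme_py; infer_instance

-- ===== CLAIM (what is proved, stated in full; the proofs are below) =====
def Claim_equal_select_theme_py : Prop := ∀ (labels : List String), Dom_select_theme_py labels → Spec_select_theme_py labels (select_theme_py labels)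

-- ===== LEMMAS AND PROOFS =====

-- A-side: non-empty intersection with the lowered-label set = some label lowers into the group
lemma inter_ne_nil_iff (labels : List String) (t : List String) :
    PySem.Set.inter (PySem.Set.ofList (labels.map PySem.Str.lower)) t ≠ [] ↔
      ∃ l ∈ labels, PySem.Str.lower l ∈ t := by
  rw [Ne, List.eq_nil_iff_forall_not_mem]
  push Not
  constructor
  · rintro ⟨y, hy⟩
    rw [PySem.Set.mem_inter, PySem.Set.mem_ofList, List.mem_map] at hy
    obtain ⟨⟨l, hl, rfl⟩, ht⟩ := hy
    exact ⟨l, hl, ht⟩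
  · rintro ⟨l, hl, ht⟩
    exact ⟨PySem.Str.lower l, by
      rw [PySem.Set.mem_inter, PySem.Set.mem_ofList, List.mem_map]
      exact ⟨⟨l, hl, rfl⟩, ht⟩⟩

-- B-side: the rank of a keyword, group by group
lemma rank_eq (k : String) :
    keywordRank.getD k 3 =
      if k ∈ (["bug", "fix", "regression"] : List String) then 0
      else if k ∈ (["docs", "documentation", "doc"] : List String) then 1
      else if k ∈ (["ops", "infrastructure", "devops", "monitoring"] : List String) then 2
      else 3 := by
  have hkt : keywordRank = PySem.Dict.mk
    [("bug", 0), ("fix", 0), ("regression", 0),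
     ("docs", 1), ("documentation", 1), ("doc", 1),
     ("ops", 2), ("infrastructure", 2), ("devops", 2), ("monitoring", 2)] := rfl
  rw [PySem.Dict.getD_eq_get?_getD, hkt]
  simp only [PySem.Dict.get?_mk_cons, List.mem_cons, List.not_mem_nil, or_false, beq_iff_eq,
    show (PySem.Dict.mk ([] : List (String × Nat))).get? k = none from rfl]
  split_ifs <;> first | rfl | simp_all [eq_comm]

-- the pure min-fold the loop computes
def minRankFold (labels : List String) (b : Nat) : Nat :=
  labels.foldl (fun acc l => min acc (keywordRank.getD (PySem.Str.lower l) 3)) b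

lemma minRankFold_zero (labels : List String) : minRankFold labels 0 = 0 := by
  induction labels with
  | nil => rfl
  | cons x xs ih => simp [minRankFold, List.foldl_cons] at ih ⊢; simpa [minRankFold] using ih

lemma bestRankLoop_eq (labels : List String) (b : Nat) :
    bestRankLoop labels b = minRankFold labels b := by
  induction labels generalizing b with
  | nil => rfl
  | cons x xs ih =>
    simp only [bestRankLoop, minRankFold, List.foldl_cons]
    set r := keywordRank.getD (PySem.Str.lower x) 3 with hr
    by_cases h : r < b
    · rw [if_pos h, Nat.min_eq_right (Nat.le_of_lt h)]
      by_cases h0 : r = 0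
      · rw [if_pos h0, h0]; exact (minRankFold_zero xs).symm
      · rw [if_neg h0]; exact ih r
    · rw [if_neg h, Nat.min_eq_left (Nat.le_of_not_lt h)]; exact ih b

lemma minRankFold_lt_iff (labels : List String) (b k : Nat) :
    minRankFold labels b < k ↔ b < k ∨ ∃ l ∈ labels, keywordRank.getD (PySem.Str.lower l) 3 < k := by
  induction labels generalizing b with
  | nil => simp [minRankFold]
  | cons x xs ih =>
    simp only [minRankFold, List.foldl_cons] at ih ⊢
    rw [ih, min_lt_iff]
    simp only [List.mem_cons]
    constructor
    · rintro ((hb | hx) | ⟨l, hl, hlt⟩)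
      · exact Or.inl hb
      · exact Or.inr ⟨x, Or.inl rfl, hx⟩
      · exact Or.inr ⟨l, Or.inr hl, hlt⟩
    · rintro (hb | ⟨l, rfl | hl, hlt⟩)
      · exact Or.inl (Or.inl hb)
      · exact Or.inl (Or.inr hlt)
      · exact Or.inr ⟨l, hl, hlt⟩

-- rank bounds per group membership
lemma rank_lt_iff (l : String) (k : Nat) (hk : k ≤ 3) :
    keywordRank.getD (PySem.Str.lower l) 3 < k ↔
      (1 ≤ k ∧ PySem.Str.lower l ∈ (["bug", "fix", "regression"] : List String)) ∨
      (2 ≤ k ∧ PySem.Str.lower l ∈ (["docs", "documentation", "doc"] : List String)) ∨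
      (3 ≤ k ∧ PySem.Str.lower l ∈ (["ops", "infrastructure", "devops", "monitoring"] : List String)) := by
  rw [rank_eq]
  split_ifs with h1 h2 h3 <;> simp_all <;> omega

-- ===== VERDICT (by name: the statement is the Claim_ definition above) =====
theorem select_theme_py_spec : Claim_equal_select_theme_py := by
  intro labels _
  simp only [Spec_select_theme_py, select_theme_py, select_theme_py_alt, bestRankLoop_eq]
  have hA1 := inter_ne_nil_iff labels (PySem.Set.ofList ["bug", "fix", "regression"])
  have hA2 := inter_ne_nil_iff labels (PySem.Set.ofList ["docs", "documentation", "doc"])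
  have hA3 := inter_ne_nil_iff labels (PySem.Set.ofList ["ops", "infrastructure", "devops", "monitoring"])
  simp only [PySem.Set.mem_ofList] at hA1 hA2 hA3
  have h1' := minRankFold_lt_iff labels 3 1
  have h2' := minRankFold_lt_iff labels 3 2
  have h3' := minRankFold_lt_iff labels 3 3
  simp only [rank_lt_iff _ 1 (by omega), rank_lt_iff _ 2 (by omega), rank_lt_iff _ 3 (by omega)] at h1' h2' h3'
  by_cases h1 : ∃ l ∈ labels, PySem.Str.lower l ∈ (["bug", "fix", "regression"] : List String)
  · rw [if_pos (hA1.mpr h1)]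
    have : minRankFold labels 3 < 1 := h1'.mpr (Or.inr (by
      obtain ⟨l, hl, hm⟩ := h1; exact ⟨l, hl, Or.inl ⟨le_refl 1, hm⟩⟩))
    have h0 : minRankFold labels 3 = 0 := by omega
    rw [h0]; rfl
  · rw [if_neg (fun hc => h1 (hA1.mp hc))]
    have hn1 : ¬ minRankFold labels 3 < 1 := by
      intro hc
      rcases h1'.mp hc with hb | ⟨l, hl, (⟨_, hm⟩ | ⟨hk, _⟩ | ⟨hk, _⟩)⟩
      · omega
      · exact h1 ⟨l, hl, hm⟩
      · omega
      · omega
    by_cases h2 : ∃ l ∈ labels, PySem.Str.lower l ∈ (["docs", "documentation", "doc"] : List String)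
    · rw [if_pos (hA2.mpr h2)]
      have : minRankFold labels 3 < 2 := h2'.mpr (Or.inr (by
        obtain ⟨l, hl, hm⟩ := h2; exact ⟨l, hl, Or.inr (Or.inl ⟨le_refl 2, hm⟩)⟩))
      have hv : minRankFold labels 3 = 1 := by omega
      rw [hv]; rfl
    · rw [if_neg (fun hc => h2 (hA2.mp hc))]
      have hn2 : ¬ minRankFold labels 3 < 2 := by
        intro hc
        rcases h2'.mp hc with hb | ⟨l, hl, (⟨_, hm⟩ | ⟨_, hm⟩ | ⟨hk, _⟩)⟩
        · omega
        · exact h1 ⟨l, hl, hm⟩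
        · exact h2 ⟨l, hl, hm⟩
        · omega
      by_cases h3 : ∃ l ∈ labels, PySem.Str.lower l ∈ (["ops", "infrastructure", "devops", "monitoring"] : List String)
      · rw [if_pos (hA3.mpr h3)]
        have : minRankFold labels 3 < 3 := h3'.mpr (Or.inr (by
          obtain ⟨l, hl, hm⟩ := h3; exact ⟨l, hl, Or.inr (Or.inr ⟨le_refl 3, hm⟩)⟩))
        have hv : minRankFold labels 3 = 2 := by omega
        rw [hv]; rfl
      · rw [if_neg (fun hc => h3 (hA3.mp hc))]
        have hn3 : ¬ minRankFold labels 3 < 3 := by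
          intro hc
          rcases h3'.mp hc with hb | ⟨l, hl, (⟨_, hm⟩ | ⟨_, hm⟩ | ⟨_, hm⟩)⟩
          · omega
          · exact h1 ⟨l, hl, hm⟩
          · exact h2 ⟨l, hl, hm⟩
          · exact h3 ⟨l, hl, hm⟩
        have hv : minRankFold labels 3 = 3 := by
          have hle : minRankFold labels 3 < 4 :=
            (minRankFold_lt_iff labels 3 4).mpr (Or.inl (by omega))
          omega
        rw [hv]; rfl
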